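-- pv_equiv track=rewrite | github.com/SountRock/myNEURONmodelOptimisation | analise/analise_optim_data.py | drop_columns_dict
-- ===== SOURCE A (Python) =====
-- def drop_columns_dict(data: dict, exact_keys: list[str] = None, patterns: list[str] = None) -> dict:
--     cleaned_dict = dict(data)
--     if exact_keys:
--         for key in exact_keys:
--             cleaned_dict.pop(key, None)
--     if patterns:
--         keys_to_remove = [k for k in cleaned_dict.keys() if any(pat in k for pat in patterns)]
--         for k in keys_to_remove:
--             cleaned_dict.pop(k, None)
--     return cleaned_dict
-- ===== SOURCE B (Python) =====
-- def drop_columns_dict(data: dict, exact_keys: list[str] = None, patterns: list[str] = None) -> dict: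
--     exact = set(exact_keys or [])
--     pats = patterns or []
--     return {k: v for k, v in data.items()
--             if k not in exact and not any(p in k for p in pats)}
-- ===== Notes on version B (the rewrite author's own statement) =====
-- stated objective: simpler
-- what changed: Replaces copy-then-two-pop-loops (mutating an intermediate dict) with a single inclusion pass: one dict comprehension keeping each item whose key is neither in the exact-key set nor matched by any pattern.
import Mathlib
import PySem

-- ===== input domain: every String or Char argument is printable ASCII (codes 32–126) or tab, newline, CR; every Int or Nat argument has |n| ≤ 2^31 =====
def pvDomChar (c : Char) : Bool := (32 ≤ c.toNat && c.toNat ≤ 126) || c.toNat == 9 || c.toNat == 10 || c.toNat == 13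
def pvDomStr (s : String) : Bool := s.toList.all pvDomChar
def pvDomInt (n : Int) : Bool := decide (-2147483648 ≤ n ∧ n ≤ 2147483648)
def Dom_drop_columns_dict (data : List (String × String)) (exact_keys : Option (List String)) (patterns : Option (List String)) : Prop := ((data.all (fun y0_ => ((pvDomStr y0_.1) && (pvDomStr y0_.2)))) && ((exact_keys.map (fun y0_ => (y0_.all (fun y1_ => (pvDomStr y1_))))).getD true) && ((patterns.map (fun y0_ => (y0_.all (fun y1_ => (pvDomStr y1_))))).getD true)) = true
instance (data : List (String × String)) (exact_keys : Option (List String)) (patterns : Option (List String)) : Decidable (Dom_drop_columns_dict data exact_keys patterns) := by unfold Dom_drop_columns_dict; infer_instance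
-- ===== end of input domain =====

-- B replaces A's copy-then-two-pop-loops with a single inclusion pass (one filter with one predicate); objective: simpler.


-- ===== PORT A =====
def drop_columns_dict (data : List (String × String)) (exact_keys : Option (List String)) (patterns : Option (List String)) : List (String × String) :=
  let cleaned := PySem.Dict.ofList data                                   -- cleaned_dict = dict(data)
  let cleaned :=
    match exact_keys with                                                 -- if exact_keys: (None and [] are falsy)
    | some ks =>
        if ks.isEmpty then cleaned
        else ks.foldl (fun d key => d.erase key) cleaned                  -- cleaned_dict.pop(key, None)
    | none => cleaned
  let cleaned :=
    match patterns with                                                   -- if patterns: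
    | some ps =>
        if ps.isEmpty then cleaned
        else
          let keys_to_remove := cleaned.keys.filter
            (fun k => ps.any (fun pat => PySem.Str.isIn pat k))           -- [k for k in cleaned_dict.keys() if any(pat in k …)]
          keys_to_remove.foldl (fun d k => d.erase k) cleaned             -- cleaned_dict.pop(k, None)
    | none => cleaned
  cleaned.items

-- ===== PORT B =====
def drop_columns_dict_alt (data : List (String × String)) (exact_keys : Option (List String)) (patterns : Option (List String)) : List (String × String) :=
  let exact := PySem.Set.ofList (exact_keys.getD [])                      -- exact = set(exact_keys or [])
  let pats := patterns.getD []                                            -- pats = patterns or []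
  data.filter (fun kv =>                                                  -- {k: v for k, v in data.items() if …}
    !(PySem.Set.contains exact kv.1) &&
    !(pats.any (fun p => PySem.Str.isIn p kv.1)))

-- ===== PRECONDITION & SPEC =====
-- Pre_ states the dict-representation invariant: 'data' models a Python dict, whose keys are distinct;
-- an association list with duplicate keys does not correspond to any Python dict input of A.
def Pre_drop_columns_dict (data : List (String × String)) (_exact_keys : Option (List String)) (_patterns : Option (List String)) : Prop :=
  (data.map Prod.fst).Nodup
instance (data : List (String × String)) (exact_keys : Option (List String)) (patterns : Option (List String)) : Decidable (Pre_drop_columns_dict data exact_keys patterns) := by unfold Pre_drop_columns_dict; infer_instance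

def pvWitness_drop_columns_dict : (List (String × String)) × Option (List String) × Option (List String) :=
  ([("a", "1"), ("ab", "2"), ("b", "3")], some ["a"], some ["b"])

def Spec_drop_columns_dict (data : List (String × String)) (exact_keys : Option (List String)) (patterns : Option (List String)) (out : List (String × String)) : Prop := out = drop_columns_dict_alt data exact_keys patterns
instance (data : List (String × String)) (exact_keys : Option (List String)) (patterns : Option (List String)) (out : List (String × String)) : Decidable (Spec_drop_columns_dict data exact_keys patterns out) := by unfold Spec_drop_columns_dict; infer_instance

-- ===== CLAIM (what is proved, stated in full; the proofs are below) =====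
def Claim_equal_drop_columns_dict : Prop := ∀ (data : List (String × String)) (exact_keys : Option (List String)) (patterns : Option (List String)), Dom_drop_columns_dict data exact_keys patterns → Pre_drop_columns_dict data exact_keys patterns → Spec_drop_columns_dict data exact_keys patterns (drop_columns_dict data exact_keys patterns)

-- ===== LEMMAS AND PROOFS =====

-- dict(data) on an association list with distinct keys keeps the items unchanged
theorem items_ofList_nodup (l : List (String × String)) (h : (l.map Prod.fst).Nodup) :
    (PySem.Dict.ofList l).items = l := by
  have := PySem.Dict.items_foldl_insert_fresh (l := l) (k := Prod.fst) (v := Prod.snd)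
    (d := (PySem.Dict.empty : PySem.Dict String String))
    (by intro a _; simp [PySem.Dict.contains_empty]) h
  simpa [PySem.Dict.ofList, PySem.Dict.update, PySem.Dict.empty] using this

-- a pop-loop over a key list is one filter on the items
theorem foldl_erase_items (ks : List String) (d : PySem.Dict String String) :
    (ks.foldl (fun d k => d.erase k) d).items
      = d.items.filter (fun p => !ks.any (fun k => p.1 == k)) := by
  induction ks generalizing d with
  | nil => simp
  | cons k ks ih =>
      rw [List.foldl_cons, ih]
      simp only [PySem.Dict.erase, List.filter_filter]
      apply List.filter_congr
      intro p _
      simp [Bool.and_comm]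

theorem any_filter_eq (l : List String) (q : String → Bool) (x : String) :
    ((l.filter q).any (fun k => x == k)) = (q x && l.any (fun k => x == k)) := by
  induction l with
  | nil => simp
  | cons a l ih =>
      by_cases hxa : x = a
      · subst hxa
        by_cases hq : q x <;> simp [hq, ih]
      · have hba : (x == a) = false := beq_eq_false_iff_ne.mpr hxa
        by_cases hq : q a <;> simp [hq, ih, hba]

theorem any_beq_of_mem (l : List String) (x : String) (hx : x ∈ l) :
    (l.any (fun k => x == k)) = true := by
  simp only [List.any_eq_true, beq_iff_eq]
  exact ⟨x, hx, rfl⟩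

theorem set_contains_ofList (ek : List String) (x : String) :
    PySem.Set.contains (PySem.Set.ofList ek) x = ek.any (fun k => x == k) := by
  by_cases h : x ∈ ek
  · rw [any_beq_of_mem ek x h]
    exact (PySem.Set.contains_iff _ _).mpr ((PySem.Set.mem_ofList _ _).mpr h)
  · have h1 : PySem.Set.contains (PySem.Set.ofList ek) x = false := by
      rw [Bool.eq_false_iff]
      intro hc
      exact h ((PySem.Set.mem_ofList _ _).mp ((PySem.Set.contains_iff _ _).mp hc))
    rw [h1]
    symm
    simp only [List.any_eq_false, beq_iff_eq]
    intro y hy hxy; exact h (hxy ▸ hy)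

-- erasing exactly the keys of d that satisfy q is one filter on the items
theorem pattern_phase_items (d : PySem.Dict String String) (q : String → Bool) :
    ((d.keys.filter q).foldl (fun d k => d.erase k) d).items
      = d.items.filter (fun p => !q p.1) := by
  rw [foldl_erase_items]
  apply List.filter_congr
  intro p hp
  have hpk : p.1 ∈ d.keys := by
    simp only [PySem.Dict.keys]
    exact List.mem_map.mpr ⟨p, hp, rfl⟩
  rw [any_filter_eq, any_beq_of_mem _ _ hpk, Bool.and_true]

-- A's two successive filters equal B's single filter with the conjoined predicate
theorem two_filters_eq (data : List (String × String)) (ek ps : List String) :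
    ((data.filter (fun p => !ek.any (fun k => p.1 == k))).filter
        (fun p => !ps.any (fun pat => PySem.Str.isIn pat p.1)))
      = data.filter (fun kv =>
          !(PySem.Set.contains (PySem.Set.ofList ek) kv.1) &&
          !(ps.any (fun p => PySem.Str.isIn p kv.1))) := by
  rw [List.filter_filter]
  apply List.filter_congr
  intro p _
  rw [set_contains_ofList]
  cases ek.any (fun k => p.1 == k) <;>
    cases ps.any (fun pat => PySem.Str.isIn pat p.1) <;> simp

-- ===== VERDICT (by name: the statement is the Claim_ definition above) =====
theorem drop_columns_dict_spec : Claim_equal_drop_columns_dict := by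
  intro data eko pso hdom hpre
  have hnd : (data.map Prod.fst).Nodup := hpre
  clear hdom hpre
  unfold Spec_drop_columns_dict drop_columns_dict drop_columns_dict_alt
  simp only []
  have hof : (PySem.Dict.ofList data).items = data := items_ofList_nodup data hnd
  have h1 : ∀ d1 : PySem.Dict String String,
      d1 = (match eko with
        | some ks => if ks.isEmpty then PySem.Dict.ofList data
            else ks.foldl (fun d key => d.erase key) (PySem.Dict.ofList data)
        | none => PySem.Dict.ofList data) →
      d1.items = data.filter (fun p => !(eko.getD []).any (fun k => p.1 == k)) := by
    intro d1 hd1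
    cases eko with
    | none => subst hd1; simp [hof]
    | some ks =>
        cases hks : ks.isEmpty with
        | true =>
            have : ks = [] := List.isEmpty_iff.mp hks
            subst this hd1
            simp [hof]
        | false =>
            subst hd1
            simp only [hks, if_false, Option.getD_some, Bool.false_eq_true]
            rw [foldl_erase_items, hof]
  cases pso with
  | none =>
      rw [h1 _ rfl, ← two_filters_eq]
      simp
  | some ps =>
      cases hps : ps.isEmpty with
      | true =>
          have : ps = [] := List.isEmpty_iff.mp hps
          subst this
          simp only [List.isEmpty_nil, if_true, Option.getD_some]
          rw [h1 _ rfl, ← two_filters_eq]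
          simp
      | false =>
          simp only [hps, Bool.false_eq_true, if_false, Option.getD_some]
          rw [pattern_phase_items, h1 _ rfl, ← two_filters_eq]
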